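-- pv_equiv track=rewrite | github.com/vadimvc/backboard | trajectory2.py | mirrorarray
-- ===== SOURCE A (Python) =====
-- def mirrorarray(array):
--     arraynew=[]
--
--     for x in range(len(array)):
--         if x == 0:
--             arraynew.append(array[0])
--             magicnumber=array[x]
--
--         else:
--             val=arraynew[x-1]-(array[x]-magicnumber)
--             arraynew.append(val)
--             magicnumber=array[x]
--
--     return arraynew
-- ===== SOURCE B (Python) =====
-- def mirrorarray(array):
--     return [2 * array[0] - v for v in array]
-- ===== Notes on version B (the rewrite author's own statement) =====
-- stated objective: simpler
-- what changed: Replaces the accumulator loop that chains each output element off the previous one (via a running 'magicnumber') with an independent per-element closed form: twice the first element minus the current element.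
import Mathlib
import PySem

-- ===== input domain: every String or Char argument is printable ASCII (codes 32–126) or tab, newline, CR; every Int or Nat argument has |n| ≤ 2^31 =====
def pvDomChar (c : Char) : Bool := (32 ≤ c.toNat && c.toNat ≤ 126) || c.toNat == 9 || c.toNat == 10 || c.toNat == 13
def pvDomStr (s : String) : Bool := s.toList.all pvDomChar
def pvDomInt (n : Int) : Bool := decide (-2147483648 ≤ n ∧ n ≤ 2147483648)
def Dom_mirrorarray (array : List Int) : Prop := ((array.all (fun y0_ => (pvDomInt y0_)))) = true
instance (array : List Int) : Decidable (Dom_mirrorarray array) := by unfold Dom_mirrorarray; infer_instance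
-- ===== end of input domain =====

-- B replaces A's chained recurrence (each element built from the previous output element and a
-- running 'magicnumber') with the independent closed form 2*array[0] - v per element.

-- ===== PORT A =====
-- loop body of A: state = (arraynew, magicnumber). magicnumber starts at an unused dummy 0
-- (Python leaves it undefined; it is only read after the x = 0 iteration has set it).
-- Indices are always in range, so pyGetD's default 0 is never used.
def pvBodyA (array : List Int) (st : List Int × Int) (x : Int) : List Int × Int :=
  if x == 0 then
    (st.1 ++ [PySem.List.pyGetD array 0 0], PySem.List.pyGetD array x 0)
  else
    let val := PySem.List.pyGetD st.1 (x - 1) 0 - (PySem.List.pyGetD array x 0 - st.2)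
    (st.1 ++ [val], PySem.List.pyGetD array x 0)

def mirrorarray (array : List Int) : List Int :=
  ((PySem.List.pyRange 0 (PySem.List.len array) 1).foldl (pvBodyA array) ([], 0)).1

-- ===== PORT B =====
def mirrorarray_alt (array : List Int) : List Int :=
  match array with
  | [] => []
  | a :: _ => array.map (fun v => 2 * a - v)

-- ===== PRECONDITION & SPEC =====
def Spec_mirrorarray (array : List Int) (out : List Int) : Prop := out = mirrorarray_alt array
instance (array : List Int) (out : List Int) : Decidable (Spec_mirrorarray array out) := by unfold Spec_mirrorarray; infer_instance

-- ===== CLAIM (what is proved, stated in full; the proofs are below) =====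
def Claim_equal_mirrorarray : Prop := ∀ (array : List Int), Dom_mirrorarray array → Spec_mirrorarray array (mirrorarray array)

-- ===== LEMMAS AND PROOFS =====

-- loop invariant: after processing indices 0..k-1 (k ≥ 1), arraynew holds the mirrored
-- prefix of length k and magicnumber is the last element read.
lemma pvLoopInv (a : Int) (rest : List Int) (k : Nat) (hk1 : 1 ≤ k)
    (hk : k ≤ (a :: rest).length) :
    (PySem.List.pyRange 0 (k : Int) 1).foldl (pvBodyA (a :: rest)) ([], 0)
      = (((a :: rest).take k).map (fun v => 2 * a - v), (a :: rest).getD (k - 1) 0) := by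
  induction k with
  | zero => omega
  | succ k ih =>
    by_cases hk0 : k = 0
    · subst hk0
      have h1 : ((0 + 1 : Nat) : Int) = 0 + 1 := by norm_num
      rw [h1, PySem.List.pyRange_one_singleton]
      simp [pvBodyA, PySem.List.pyGetD]
      ring
    · have hk1' : 1 ≤ k := by omega
      have hklen : k < (a :: rest).length := by omega
      have hsplit : PySem.List.pyRange 0 ((k : Int) + 1) 1
          = PySem.List.pyRange 0 (k : Int) 1 ++ [(k : Int)] := by
        exact PySem.List.pyRange_one_succ_right (by exact_mod_cast Nat.zero_le k)
      have : ((k + 1 : Nat) : Int) = (k : Int) + 1 := by push_cast; ring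
      rw [this, hsplit, List.foldl_append, ih hk1' (by omega)]
      have hne : ¬ ((k : Int) == 0) = true := by simp; omega
      have hmap_len : (((a :: rest).take k).map (fun v => 2 * a - v)).length = k := by
        rw [List.length_map, List.length_take_of_le (le_of_lt hklen)]
      have hidx : ((k : Int) - 1) = ((k - 1 : Nat) : Int) := by omega
      simp only [List.foldl_cons, List.foldl_nil, pvBodyA, hne, Bool.false_eq_true, if_false]
      have hget1 : PySem.List.pyGetD (((a :: rest).take k).map (fun v => 2 * a - v)) ((k : Int) - 1) 0
          = 2 * a - (a :: rest).getD (k - 1) 0 := by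
        rw [hidx, PySem.List.pyGetD_natCast]
        have hlt : k - 1 < k := by omega
        have hlt2 : k - 1 < (a :: rest).length := by omega
        rw [List.getD_eq_getElem?_getD, List.getElem?_map]
        rw [List.getElem?_take_of_lt hlt, List.getElem?_eq_getElem hlt2]
        simp [List.getD_eq_getElem?_getD, List.getElem?_eq_getElem hlt2]
      have hget2 : PySem.List.pyGetD (a :: rest) (k : Int) 0 = (a :: rest).getD k 0 := by
        exact_mod_cast PySem.List.pyGetD_natCast (a :: rest) k 0
      have htake : (a :: rest).take (k + 1) = (a :: rest).take k ++ [(a :: rest).getD k 0] := by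
        rw [List.take_add_one, List.getElem?_eq_getElem hklen]
        simp [List.getD_eq_getElem?_getD, List.getElem?_eq_getElem hklen]
      rw [hget1, hget2, htake, List.map_append, Nat.add_sub_cancel]
      simp only [List.map_cons, List.map_nil, Prod.mk.injEq, List.append_cancel_left_eq,
        List.cons.injEq, and_true]
      ring

theorem mirrorarray_spec : Claim_equal_mirrorarray := by
  intro array _
  unfold Spec_mirrorarray
  cases array with
  | nil => rfl
  | cons a rest =>
    unfold mirrorarray mirrorarray_alt
    rw [PySem.List.len_eq]
    have := pvLoopInv a rest (a :: rest).length (by simp) (le_refl _)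
    rw [this]
    simp
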